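-- pv_equiv track=rewrite | github.com/russellsayshi/GroomsGang | app.py | strings_to_votes
-- ===== SOURCE A (Python) =====
-- roommates = ['Russell', 'Alex', 'Eli'] # do not change order
--
-- def strings_to_votes(arr):
--     votes = 0
--     for name in arr:
--         for index, roommate in enumerate(roommates):
--             if roommate.lower() == name.lower():
--                 votes += 2 ** index
--                 break
--     return votes
-- ===== SOURCE B (Python) =====
-- roommates = ['Russell', 'Alex', 'Eli'] # do not change order
--
-- def strings_to_votes(arr):
--     counts = {}
--     for name in arr:
--         key = name.lower()
--         counts[key] = counts.get(key, 0) + 1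
--     votes = 0
--     for index, roommate in enumerate(roommates):
--         votes += counts.get(roommate.lower(), 0) * 2 ** index
--     return votes
-- ===== Notes on version B (the rewrite author's own statement) =====
-- stated objective: alternative
-- what changed: B replaces A's per-name inner scan over roommates (with break) by one tally pass building a frequency table of lowercased names, then a single 3-iteration pass over the fixed roommates list multiplying each count by its power-of-two weight.
import Mathlib
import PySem

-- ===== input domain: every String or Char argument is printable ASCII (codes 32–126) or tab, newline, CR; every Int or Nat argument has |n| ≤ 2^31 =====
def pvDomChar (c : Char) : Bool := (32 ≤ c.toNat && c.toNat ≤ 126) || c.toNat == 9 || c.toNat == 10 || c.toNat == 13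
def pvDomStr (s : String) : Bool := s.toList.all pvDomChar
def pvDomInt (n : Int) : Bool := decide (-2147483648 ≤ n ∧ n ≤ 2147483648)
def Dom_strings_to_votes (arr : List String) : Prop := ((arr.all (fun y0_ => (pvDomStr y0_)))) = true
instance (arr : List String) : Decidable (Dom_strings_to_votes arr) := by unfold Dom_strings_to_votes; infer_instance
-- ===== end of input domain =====

-- B replaces the per-name inner scan over roommates by one frequency-table pass plus a fixed 3-step weighted pass (alternative decomposition, same result).


-- ===== PORT A =====
def pvRoommates : List String := ["Russell", "Alex", "Eli"]

-- A: for each name, scan enumerate(roommates) and add 2**index at the first (break) case-insensitive match.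
def strings_to_votes (arr : List String) : Int :=
  arr.foldl (fun votes name =>
    match (PySem.List.enumerate pvRoommates 0).find?
        (fun p => PySem.Str.lower p.2 == PySem.Str.lower name) with
    | some (index, _) => votes + (2 : Int) ^ index.toNat
    | none => votes) 0

-- ===== PORT B =====
-- B: build a frequency table of lowercased names, then one pass over the fixed roommates list.
def strings_to_votes_alt (arr : List String) : Int :=
  let counts : PySem.Dict String Int :=
    arr.foldl (fun d name =>
      d.insert (PySem.Str.lower name) (d.getD (PySem.Str.lower name) 0 + 1)) PySem.Dict.empty
  (PySem.List.enumerate pvRoommates 0).foldl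
    (fun votes p => votes + counts.getD (PySem.Str.lower p.2) 0 * (2 : Int) ^ p.1.toNat) 0

-- ===== PRECONDITION & SPEC =====
def Spec_strings_to_votes (arr : List String) (out : Int) : Prop := out = strings_to_votes_alt arr
instance (arr : List String) (out : Int) : Decidable (Spec_strings_to_votes arr out) := by unfold Spec_strings_to_votes; infer_instance

-- ===== CLAIM (what is proved, stated in full; the proofs are below) =====
def Claim_equal_strings_to_votes : Prop := ∀ (arr : List String), Dom_strings_to_votes arr → Spec_strings_to_votes arr (strings_to_votes arr)

-- ===== LEMMAS AND PROOFS =====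

-- weight of a lowercased name under A's first-match rule
def pvW (k : String) : Int :=
  if k = "russell" then 1 else if k = "alex" then 2 else if k = "eli" then 4 else 0

lemma pvA_step (votes : Int) (name : String) :
    (match (PySem.List.enumerate pvRoommates 0).find?
        (fun p => PySem.Str.lower p.2 == PySem.Str.lower name) with
    | some (index, _) => votes + (2 : Int) ^ index.toNat
    | none => votes) = votes + pvW (PySem.Str.lower name) := by
  have hr : PySem.Str.lower "Russell" = "russell" := by decide
  have ha : PySem.Str.lower "Alex" = "alex" := by decide
  have he : PySem.Str.lower "Eli" = "eli" := by decide
  simp only [pvRoommates, PySem.List.enumerate_cons, PySem.List.enumerate_nil,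
    List.find?, hr, ha, he]
  by_cases h1 : PySem.Str.lower name = "russell"
  · simp [h1, pvW]
  · have b1 : ("russell" == PySem.Str.lower name) = false := by simp [Ne.symm h1]
    by_cases h2 : PySem.Str.lower name = "alex"
    · simp [h2, pvW]
    · have b2 : ("alex" == PySem.Str.lower name) = false := by simp [Ne.symm h2]
      by_cases h3 : PySem.Str.lower name = "eli"
      · simp [h3, pvW]
      · have b3 : ("eli" == PySem.Str.lower name) = false := by simp [Ne.symm h3]
        simp [b1, b2, b3, pvW, h1, h2, h3]

lemma pvA_eq_sum (l : List String) : ∀ (v : Int),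
    l.foldl (fun votes name =>
      (match (PySem.List.enumerate pvRoommates 0).find?
          (fun p => PySem.Str.lower p.2 == PySem.Str.lower name) with
      | some (index, _) => votes + (2 : Int) ^ index.toNat
      | none => votes)) v
    = v + ((l.map PySem.Str.lower).count "russell" : Int) * 1
        + ((l.map PySem.Str.lower).count "alex" : Int) * 2
        + ((l.map PySem.Str.lower).count "eli" : Int) * 4 := by
  induction l with
  | nil => intro v; simp
  | cons x t ih =>
    intro v
    rw [List.foldl_cons, pvA_step, ih]
    simp only [List.map_cons, List.count_cons]
    by_cases h1 : PySem.Str.lower x = "russell"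
    · simp [pvW, h1]; ring
    · by_cases h2 : PySem.Str.lower x = "alex"
      · simp [pvW, h2]; ring
      · by_cases h3 : PySem.Str.lower x = "eli"
        · simp [pvW, h1, h3]; ring
        · simp [pvW, h1, h2, h3]

lemma pvCounts_getD (arr : List String) (k : String) :
    (arr.foldl (fun d name =>
      d.insert (PySem.Str.lower name) (d.getD (PySem.Str.lower name) 0 + 1))
      (PySem.Dict.empty : PySem.Dict String Int)).getD k 0
    = ((arr.map PySem.Str.lower).count k : Int) := by
  have h := PySem.Dict.getD_foldl_insert_add_one (arr.map PySem.Str.lower)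
      (PySem.Dict.empty : PySem.Dict String Int) k
  rw [List.foldl_map] at h
  simpa using h

-- ===== VERDICT (by name: the statement is the Claim_ definition above) =====
theorem strings_to_votes_spec : Claim_equal_strings_to_votes := by
  intro arr _
  unfold Spec_strings_to_votes strings_to_votes strings_to_votes_alt
  have hr : PySem.Str.lower "Russell" = "russell" := by decide
  have ha : PySem.Str.lower "Alex" = "alex" := by decide
  have he : PySem.Str.lower "Eli" = "eli" := by decide
  rw [pvA_eq_sum]
  simp only [pvRoommates, PySem.List.enumerate_cons, PySem.List.enumerate_nil,
    List.foldl_cons, List.foldl_nil, hr, ha, he, pvCounts_getD]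
  norm_num
  exact Or.inl (by decide)
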